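-- pv_equiv track=rewrite | github.com/pypi-data/pypi-mirror-374 | packages/xlpkg/xlpkg-1.0.0.132.tar.gz/xlpkg-1.0.0.132/xlpkg/x.py | f_sql_split
-- ===== SOURCE A (Python) =====
-- def f_sql_split(sql: str):
--     from sqlglot import parse
--     """
--     将包含多条 SQL 的字符串按分号分割，忽略注释和字符串中的分号
--     支持:
--         - 单引号字符串 ('...')
--         - 双引号字符串 ("...")
--         - 反引号标识符 (`...`)
--         - 单行注释 (-- 注释内容 或 # 注释内容)
--         - 多行注释 /* ... */
--     """
--
--     statements = []
--     buffer = []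
--     i = 0
--     n = len(sql)
--
--     in_sline_comm = False
--     in_mline_comm = False
--     in_string = False
--     string_delimiter = None  # ' " `
--
--     while i < n:
--         c = sql[i]
--
--         # 处理单行注释（-- 或 #）
--         if not in_mline_comm and not in_string and not in_sline_comm:
--             if c == '-' and i + 1 < n and sql[i + 1] == '-':
--                 in_sline_comm = True
--                 i += 2
--                 continue
--             elif c == '#':
--                 in_sline_comm = True
--                 i += 1
--                 continue
--
--         # 处理多行注释 /* ... */
--         if not in_string and not in_sline_comm and not in_mline_comm:
--             if c == '/' and i + 1 < n and sql[i + 1] == '*':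
--                 in_mline_comm = True
--                 i += 2
--                 continue
--
--         if in_mline_comm:
--             if c == '*' and i + 1 < n and sql[i + 1] == '/':
--                 in_mline_comm = False
--                 i += 2
--                 continue
--             else:
--                 i += 1
--                 continue
--
--         if in_sline_comm:
--             if c == '\n':
--                 in_sline_comm = False
--             else:
--                 i += 1
--                 continue
--
--         # 处理字符串或反引号
--         if not in_mline_comm and not in_sline_comm:
--             if c in ('"', "'", "`") and (i == 0 or sql[i - 1] != '\\'):
--                 if in_string:
--                     if c == string_delimiter:
--                         in_string = False
--                         string_delimiter = None
--                 else:
--                     in_string = True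
--                     string_delimiter = c
--             elif c == ';' and not in_string:
--                 # 分割 SQL 语句
--                 statement = ''.join(buffer).strip()
--                 if statement:
--                     statements.append(statement)
--                 buffer = []
--                 i += 1
--                 continue
--
--         buffer.append(c)
--         i += 1
--
--     # 添加最后一条语句
--     statement = ''.join(buffer).strip()
--     if statement:
--         statements.append(statement)
--
--     return statements
-- ===== SOURCE B (Python) =====
-- def f_sql_split(sql: str):
--     """Boundary-jumping scanner: instead of a per-character state machine,
--     jump between significant tokens with str.find."""
--     statements = []
--     buf = []
--     i = 0
--     n = len(sql)
--
--     def flush():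
--         st = ''.join(buf).strip()
--         if st:
--             statements.append(st)
--
--     while i < n:
--         c = sql[i]
--         if c == '-' and i + 1 < n and sql[i + 1] == '-':
--             j = sql.find('\n', i + 2)
--             if j == -1:
--                 break
--             buf.append('\n')          # the comment-ending newline is kept
--             i = j + 1
--         elif c == '#':
--             j = sql.find('\n', i + 1)
--             if j == -1:
--                 break
--             buf.append('\n')
--             i = j + 1
--         elif c == '/' and i + 1 < n and sql[i + 1] == '*':
--             j = sql.find('*/', i + 2)
--             if j == -1:
--                 break
--             i = j + 2
--         elif c in '"\'`' and (i == 0 or sql[i - 1] != '\\'):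
--             j = sql.find(c, i + 1)
--             while j != -1 and sql[j - 1] == '\\':
--                 j = sql.find(c, j + 1)
--             if j == -1:
--                 buf.append(sql[i:])   # unterminated string: keep the rest
--                 break
--             buf.append(sql[i:j + 1])
--             i = j + 1
--         elif c == ';':
--             flush()
--             buf = []
--             i += 1
--         else:
--             buf.append(c)
--             i += 1
--     flush()
--     return statements
-- ===== Notes on version B (the rewrite author's own statement) =====
-- stated objective: alternative
-- what changed: Replaces A's per-character state machine (one loop iteration and state update per character) by a boundary-jumping scanner that uses str.find to locate the comment/string terminator and skip or copy the whole span at once.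
import Mathlib
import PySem

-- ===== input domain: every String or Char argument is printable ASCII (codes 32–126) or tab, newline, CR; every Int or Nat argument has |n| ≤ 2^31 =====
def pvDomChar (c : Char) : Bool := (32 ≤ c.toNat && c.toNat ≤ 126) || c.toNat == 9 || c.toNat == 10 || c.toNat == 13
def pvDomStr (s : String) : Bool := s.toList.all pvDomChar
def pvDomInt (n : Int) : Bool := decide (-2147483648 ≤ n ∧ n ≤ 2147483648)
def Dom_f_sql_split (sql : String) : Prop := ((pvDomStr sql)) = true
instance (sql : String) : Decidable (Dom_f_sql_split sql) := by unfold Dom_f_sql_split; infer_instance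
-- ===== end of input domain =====

-- B replaces A's per-character state machine by a boundary-jumping scanner: it finds the
-- comment/string terminator with a find helper and skips or copies the whole span at once.

-- tiny arithmetic facts cited by the termination proofs (keeps the compiled values small)
theorem pvDecStep {n i k : Nat} (h : i < n) (hk : 1 ≤ k) : n - (i + k) < n - i := by omega
theorem pvDecJump {n i j k : Nat} (h : i < n) (hij : i ≤ j) (hk : 1 ≤ k) : n - (j + k) < n - i := by omega

-- shared flush helper: ''.join(buffer).strip(), appended if non-empty (identical line in A and B)
def pvFlush (buf : List Char) (stmts : List String) : List String :=
  let st := PySem.Chars.strip buf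
  if st ≠ [] then stmts ++ [String.mk st] else stmts

-- ===== PORT A =====
-- literal transliteration of A's while-loop; state = (i, sline, mline, instr, delim, buf, stmts)
def loopA (cs : List Char) (i : Nat) (sline mline instr : Bool) (delim : Option Char)
    (buf : List Char) (stmts : List String) : List String :=
  if h : i < cs.length then
    let c := cs.getD i ' '
    if sline = false ∧ mline = false ∧ instr = false ∧ c = '-' ∧ i + 1 < cs.length ∧ cs.getD (i+1) ' ' = '-' then
      loopA cs (i+2) true mline instr delim buf stmts
    else if sline = false ∧ mline = false ∧ instr = false ∧ c = '#' then
      loopA cs (i+1) true mline instr delim buf stmts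
    else if sline = false ∧ mline = false ∧ instr = false ∧ c = '/' ∧ i + 1 < cs.length ∧ cs.getD (i+1) ' ' = '*' then
      loopA cs (i+2) sline true instr delim buf stmts
    else if mline = true then
      if c = '*' ∧ i + 1 < cs.length ∧ cs.getD (i+1) ' ' = '/' then
        loopA cs (i+2) sline false instr delim buf stmts
      else
        loopA cs (i+1) sline mline instr delim buf stmts
    else if sline = true ∧ c ≠ '\n' then
      loopA cs (i+1) sline mline instr delim buf stmts
    else
      -- past here in_sline_comm has been set to False (it was only true when c = '\n')
      if (c = '"' ∨ c = '\'' ∨ c = '`') ∧ (i = 0 ∨ cs.getD (i-1) ' ' ≠ '\\') then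
        if instr = true then
          if delim = some c then
            loopA cs (i+1) false mline false none (buf ++ [c]) stmts
          else
            loopA cs (i+1) false mline instr delim (buf ++ [c]) stmts
        else
          loopA cs (i+1) false mline true (some c) (buf ++ [c]) stmts
      else if c = ';' ∧ instr = false then
        loopA cs (i+1) false mline instr delim [] (pvFlush buf stmts)
      else
        loopA cs (i+1) false mline instr delim (buf ++ [c]) stmts
  else
    pvFlush buf stmts
termination_by cs.length - i
decreasing_by all_goals exact pvDecStep h (by decide)

def f_sql_split (sql : String) : List String :=
  loopA sql.toList 0 false false false none [] []

-- ===== PORT B =====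
-- port of str.find(ch, j): first index ≥ j holding ch
def findCh (cs : List Char) (c : Char) (j : Nat) : Option Nat :=
  if h : j < cs.length then
    if cs.getD j ' ' = c then some j else findCh cs c (j+1)
  else none
termination_by cs.length - j
decreasing_by exact pvDecStep h (by decide)

theorem findCh_bounds {cs : List Char} {c : Char} {j k : Nat}
    (h : findCh cs c j = some k) : j ≤ k ∧ k < cs.length := by
  by_cases hj : j < cs.length
  · rw [findCh] at h
    simp only [dif_pos hj] at h
    split at h
    · cases h; omega
    · have := findCh_bounds h; omega
  · rw [findCh] at h; simp [dif_neg hj] at h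
termination_by cs.length - j
decreasing_by omega

-- port of str.find("*/", j)
def findStarSlash (cs : List Char) (j : Nat) : Option Nat :=
  if h : j < cs.length then
    if cs.getD j ' ' = '*' ∧ j + 1 < cs.length ∧ cs.getD (j+1) ' ' = '/' then some j
    else findStarSlash cs (j+1)
  else none
termination_by cs.length - j
decreasing_by exact pvDecStep h (by decide)

theorem findStarSlash_bounds {cs : List Char} {j k : Nat}
    (h : findStarSlash cs j = some k) : j ≤ k ∧ k < cs.length := by
  by_cases hj : j < cs.length
  · rw [findStarSlash] at h
    simp only [dif_pos hj] at h
    split at h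
    · cases h; omega
    · have := findStarSlash_bounds h; omega
  · rw [findStarSlash] at h; simp [dif_neg hj] at h
termination_by cs.length - j
decreasing_by omega

-- port of B's repeated-find loop: next occurrence of d not preceded by a backslash
def findUnescaped (cs : List Char) (d : Char) (j : Nat) : Option Nat :=
  match hk : findCh cs d j with
  | none => none
  | some k => if cs.getD (k-1) ' ' = '\\' then findUnescaped cs d (k+1) else some k
termination_by cs.length - j
decreasing_by exact pvDecJump (Nat.lt_of_le_of_lt (findCh_bounds hk).1 (findCh_bounds hk).2) (findCh_bounds hk).1 (by decide)

theorem findUnescaped_bounds {cs : List Char} {d : Char} {j k : Nat}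
    (h : findUnescaped cs d j = some k) : j ≤ k ∧ k < cs.length := by
  rw [findUnescaped] at h
  split at h
  · exact absurd h (by simp)
  · rename_i k' hk
    have hb := findCh_bounds hk
    split at h
    · have := findUnescaped_bounds h; omega
    · cases h; omega
termination_by cs.length - j
decreasing_by
  have := findCh_bounds (show findCh cs d j = some _ by assumption); omega

-- transliteration of B's boundary-jumping scanner
def scanB (cs : List Char) (i : Nat) (buf : List Char) (stmts : List String) : List String :=
  if h : i < cs.length then
    let c := cs.getD i ' '
    if c = '-' ∧ i + 1 < cs.length ∧ cs.getD (i+1) ' ' = '-' then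
      match hj : findCh cs '\n' (i+2) with
      | none => pvFlush buf stmts
      | some j => scanB cs (j+1) (buf ++ ['\n']) stmts
    else if c = '#' then
      match hj : findCh cs '\n' (i+1) with
      | none => pvFlush buf stmts
      | some j => scanB cs (j+1) (buf ++ ['\n']) stmts
    else if c = '/' ∧ i + 1 < cs.length ∧ cs.getD (i+1) ' ' = '*' then
      match hj : findStarSlash cs (i+2) with
      | none => pvFlush buf stmts
      | some j => scanB cs (j+2) buf stmts
    else if (c = '"' ∨ c = '\'' ∨ c = '`') ∧ (i = 0 ∨ cs.getD (i-1) ' ' ≠ '\\') then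
      match hj : findUnescaped cs c (i+1) with
      | none => pvFlush (buf ++ cs.drop i) stmts
      | some j => scanB cs (j+1) (buf ++ (cs.drop i).take (j+1-i)) stmts
    else if c = ';' then
      scanB cs (i+1) [] (pvFlush buf stmts)
    else
      scanB cs (i+1) (buf ++ [c]) stmts
  else pvFlush buf stmts
termination_by cs.length - i
decreasing_by
  · exact pvDecJump h (Nat.le_trans (Nat.le_add_right i 2) (findCh_bounds hj).1) (by decide)
  · exact pvDecJump h (Nat.le_trans (Nat.le_add_right i 1) (findCh_bounds hj).1) (by decide)
  · exact pvDecJump h (Nat.le_trans (Nat.le_add_right i 2) (findStarSlash_bounds hj).1) (by decide)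
  · exact pvDecJump h (Nat.le_trans (Nat.le_add_right i 1) (findUnescaped_bounds hj).1) (by decide)
  · exact pvDecStep h (by decide)
  · exact pvDecStep h (by decide)

def f_sql_split_alt (sql : String) : List String :=
  scanB sql.toList 0 [] []

-- ===== PRECONDITION & SPEC =====
def Spec_f_sql_split (sql : String) (out : List String) : Prop := out = f_sql_split_alt sql
instance (sql : String) (out : List String) : Decidable (Spec_f_sql_split sql out) := by unfold Spec_f_sql_split; infer_instance

-- ===== CLAIM (what is proved, stated in full; the proofs are below) =====
def Claim_equal_f_sql_split : Prop := ∀ (sql : String), Dom_f_sql_split sql → Spec_f_sql_split sql (f_sql_split sql)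

-- ===== LEMMAS AND PROOFS =====

-- A in a single-line comment scans to the next newline; the newline itself is appended
theorem loopA_sline (cs : List Char) (i : Nat) (buf : List Char) (stmts : List String) :
    loopA cs i true false false none buf stmts =
      match findCh cs '\n' i with
      | none => pvFlush buf stmts
      | some j => loopA cs (j+1) false false false none (buf ++ ['\n']) stmts := by
  by_cases h : i < cs.length
  · rw [loopA, findCh]
    have hg : cs.getD i ' ' = cs[i] := List.getD_eq_getElem cs ' ' h
    by_cases hc : cs[i] = '\n'
    · simp [h, hg, hc]
    · simp [h, hg, hc, loopA_sline cs (i+1) buf stmts]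
  · rw [loopA, findCh]; simp [h]
termination_by cs.length - i
decreasing_by all_goals omega

-- A in a /* */ comment scans to the closing */, appending nothing
theorem loopA_mline (cs : List Char) (i : Nat) (buf : List Char) (stmts : List String) :
    loopA cs i false true false none buf stmts =
      match findStarSlash cs i with
      | none => pvFlush buf stmts
      | some j => loopA cs (j+2) false false false none buf stmts := by
  by_cases h : i < cs.length
  · rw [loopA, findStarSlash]
    by_cases hc : cs[i] = '*' ∧ i + 1 < cs.length ∧ cs[i+1]?.getD ' ' = '/'
    · have h22 : cs[i+1]'hc.2.1 = '/' := by
        have := hc.2.2; simpa [List.getElem?_eq_getElem hc.2.1] using this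
      simp [h, hc.1, hc.2.1, h22]
    · simp [h, hc, loopA_mline cs (i+1) buf stmts]
  · rw [loopA, findStarSlash]; simp [h]
termination_by cs.length - i
decreasing_by all_goals omega

theorem findUnescaped_eq (cs : List Char) (d : Char) (j : Nat) :
    findUnescaped cs d j =
      match findCh cs d j with
      | none => none
      | some k => if cs.getD (k-1) ' ' = '\\' then findUnescaped cs d (k+1) else some k := by
  rw [findUnescaped]
  split
  · rename_i hfc; rw [hfc]
  · rename_i k hfc; rw [hfc]

set_option maxRecDepth 4000 in
theorem loopA_str (cs : List Char) (d : Char) (hd : d = '"' ∨ d = '\'' ∨ d = '`')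
    (i : Nat) (buf : List Char) (stmts : List String) :
    loopA cs i false false true (some d) buf stmts =
      match findUnescaped cs d i with
      | none => pvFlush (buf ++ cs.drop i) stmts
      | some j => loopA cs (j+1) false false false none (buf ++ (cs.drop i).take (j+1-i)) stmts := by
  have hdsl : d ≠ '\\' := by rcases hd with rfl|rfl|rfl <;> decide
  by_cases h : i < cs.length
  · have hdrop : cs.drop i = cs[i] :: cs.drop (i+1) := List.drop_eq_getElem_cons h
    have hgi : cs.getD i ' ' = cs[i] := List.getD_eq_getElem cs ' ' h
    have key := loopA_str cs d hd (i+1) (buf ++ [cs[i]]) stmts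
    by_cases hcd : cs[i] = d
    · by_cases hesc : cs[i-1]?.getD ' ' = '\\'
      · -- escaped delimiter: appended, string stays open
        have hi0 : i ≠ 0 := by
          intro h0; subst h0
          simp only [Nat.zero_sub, List.getElem?_eq_getElem h, Option.getD_some] at hesc
          rw [hcd] at hesc; exact hdsl hesc
        have hstep : findUnescaped cs d i = findUnescaped cs d (i+1) := by
          rw [findUnescaped_eq, findCh]
          simp [h, hgi, hcd, List.getD_eq_getElem?_getD, hesc]
        have hsemi : cs[i] ≠ ';' := by rw [hcd]; rcases hd with rfl|rfl|rfl <;> decide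
        rw [loopA, hstep]
        cases hj : findUnescaped cs d (i+1) with
        | none =>
          simp only [dif_pos h]
          simp only [hgi]
          simp [h, hsemi, hi0, List.getD_eq_getElem?_getD, hesc]
          rw [key, hj]
          rw [hdrop]; simp only [List.append_assoc, List.singleton_append]
        | some j =>
          have hb := findUnescaped_bounds hj
          have har : j + 1 - i = (j - i) + 1 := by omega
          have har2 : j + 1 - (i+1) = j - i := by omega
          simp only [dif_pos h]
          simp only [hgi]
          simp [h, hsemi, hi0, List.getD_eq_getElem?_getD, hesc]
          rw [key, hj]
          simp only [har, har2, hdrop, List.take_succ_cons, List.append_assoc, List.singleton_append]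
      · -- unescaped delimiter: string closes, delimiter appended
        have hsome : findUnescaped cs d i = some i := by
          rw [findUnescaped_eq, findCh]
          simp [h, hgi, hcd, List.getD_eq_getElem?_getD, hesc]
        rw [loopA, hsome]
        simp only [dif_pos h]
        simp only [hgi]
        have har0 : i + 1 - i = 1 := by omega
        rcases hd with rfl|rfl|rfl <;>
        · simp [h, hcd, List.getD_eq_getElem?_getD, hesc]
          simp only [har0, hdrop, List.take_succ_cons, List.take_zero, List.append_assoc,
            List.singleton_append]
          rw [hcd]
    · -- any other character: appended, string stays open
      have hstep : findUnescaped cs d i = findUnescaped cs d (i+1) := by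
        conv_lhs => rw [findUnescaped_eq, findCh]
        conv_rhs => rw [findUnescaped_eq]
        simp [h, hgi, hcd]
      have hdelim : ¬ (some d = some cs[i]) := fun he => hcd (by cases he; rfl)
      rw [loopA, hstep]
      cases hj : findUnescaped cs d (i+1) with
      | none =>
        simp only [dif_pos h]
        simp only [hgi]
        simp [h, hdelim]
        rw [key, hj]
        rw [hdrop]; simp only [List.append_assoc, List.singleton_append]
      | some j =>
        have hb := findUnescaped_bounds hj
        have har : j + 1 - i = (j - i) + 1 := by omega
        have har2 : j + 1 - (i+1) = j - i := by omega
        simp only [dif_pos h]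
        simp only [hgi]
        simp [h, hdelim]
        rw [key, hj]
        simp only [har, har2, hdrop, List.take_succ_cons, List.append_assoc, List.singleton_append]
  · rw [loopA, findUnescaped_eq, findCh]
    simp [h, List.drop_eq_nil_of_le (le_of_not_gt h)]
termination_by cs.length - i
decreasing_by all_goals omega

theorem loopA_eq_scanB (cs : List Char) (i : Nat) (buf : List Char) (stmts : List String) :
    loopA cs i false false false none buf stmts = scanB cs i buf stmts := by
  by_cases h : i < cs.length
  · have hgi : cs.getD i ' ' = cs[i] := List.getD_eq_getElem cs ' ' h
    have hdrop : cs.drop i = cs[i] :: cs.drop (i+1) := List.drop_eq_getElem_cons h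
    rw [loopA, scanB]
    simp only [dif_pos h]
    simp only [hgi, List.getD_eq_getElem?_getD]
    by_cases h1 : cs[i] = '-' ∧ i + 1 < cs.length ∧ cs[i+1]?.getD ' ' = '-'
    · have h12 : cs[i+1]'h1.2.1 = '-' := by
        have := h1.2.2; simpa [List.getElem?_eq_getElem h1.2.1] using this
      simp only [h1.1, h1.2.1, h12, and_self, true_and, and_true, if_pos, eq_self_iff_true]
      simp
      rw [loopA_sline]
      cases hj : findCh cs '\n' (i+2) with
      | none => simp [hj, h1.2.2]
      | some j =>
        have hb := findCh_bounds hj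
        simp [hj, h1.2.2, loopA_eq_scanB cs (j+1) (buf ++ ['\n']) stmts]
    · by_cases h2 : cs[i] = '#'
      · simp only [h1, h2, if_pos, if_neg, eq_self_iff_true, and_self, true_and, and_true]
        simp [h1]
        rw [loopA_sline]
        cases hj : findCh cs '\n' (i+1) with
        | none => simp [hj]
        | some j =>
          have hb := findCh_bounds hj
          simp [hj, loopA_eq_scanB cs (j+1) (buf ++ ['\n']) stmts]
      · by_cases h3 : cs[i] = '/' ∧ i + 1 < cs.length ∧ cs[i+1]?.getD ' ' = '*'
        · have h32 : cs[i+1]'h3.2.1 = '*' := by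
            have := h3.2.2; simpa [List.getElem?_eq_getElem h3.2.1] using this
          simp [h1, h2, h3.1, h3.2.1, h32]
          rw [loopA_mline]
          cases hj : findStarSlash cs (i+2) with
          | none => simp [hj]
          | some j =>
            have hb := findStarSlash_bounds hj
            simp [hj, loopA_eq_scanB cs (j+2) buf stmts]
        · by_cases h4 : (cs[i] = '"' ∨ cs[i] = '\'' ∨ cs[i] = '`') ∧ (i = 0 ∨ ¬ cs[i-1]?.getD ' ' = '\\')
          · simp [h1, h2, h3, h4]
            rw [loopA_str cs (cs[i]) h4.1 (i+1) (buf ++ [cs[i]]) stmts]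
            cases hju : findUnescaped cs (cs.getD i ' ') (i+1) with
            | none =>
              have hj : findUnescaped cs cs[i] (i+1) = none := by rw [← hgi]; exact hju
              simp [hj]
            | some j =>
              have hj : findUnescaped cs cs[i] (i+1) = some j := by rw [← hgi]; exact hju
              have hb := findUnescaped_bounds hj
              have har : j + 1 - i = (j - i) + 1 := by omega
              have har2 : j + 1 - (i+1) = j - i := by omega
              rw [hj]
              simp only [loopA_eq_scanB cs (j+1) (buf ++ [cs[i]] ++ (cs.drop (i+1)).take (j+1-(i+1))) stmts]
              simp only [har, har2, hdrop, List.take_succ_cons, List.append_assoc,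
                List.singleton_append]
          · by_cases h5 : cs[i] = ';'
            · simp [h1, h2, h3, h4, h5, loopA_eq_scanB cs (i+1) [] (pvFlush buf stmts)]
            · simp [h1, h2, h3, h4, h5, loopA_eq_scanB cs (i+1) (buf ++ [cs[i]]) stmts]
  · rw [loopA, scanB]; simp [h]
termination_by cs.length - i
decreasing_by all_goals omega

-- ===== VERDICT (by name: the statement is the Claim_ definition above) =====
theorem f_sql_split_spec : Claim_equal_f_sql_split := by
  intro sql _
  unfold Spec_f_sql_split f_sql_split f_sql_split_alt
  exact loopA_eq_scanB _ 0 [] []
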